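-- pv_equiv track=rewrite | github.com/cloudlane-one/py-research | src/py_research/intl.py | _ldml_to_posix_format
-- ===== SOURCE A (Python) =====
-- _ldml_to_posix = {
--     "a": "%p",  # AM or PM
--     "dd": "%d",  # day of month, padded
--     "d": "%e",  # day of month, unpadded
--     "DDD": "%j",  # day of year, padded
--     "DD": "%-j",  # day of year, unpadded
--     "D": "%-j",  # day of year, unpadded
--     "EEEE": "%A",  # weekday
--     "hh": "%I",  # 12-hour time, padded
--     "h": "%-I",  # 12-hour time, unpadded
--     "HH": "%H",  # 24-hour time, padded
--     "H": "%-H",  # 24-hour time, unpadded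
--     "MMMM": "%B",  # month: name, full
--     "MMM": "%b",  # month name, short
--     "MM": "%m",  # month, padded
--     "M": "%-m",  # month, unpadded
--     "mm": "%M",  # minute, padded
--     "m": "%-M",  # minute, unpadded
--     "ss": "%S",  # second, padded
--     "s": "%-S",  # second, unpadded
--     "yyyy": "%Y",  # year, full
--     "yy": "%y",  # year, two-digit
--     "y": "%Y",  # year, full
--     "Z": "%Z",  # timezone
--     "zzzz": "%Z",  # timezone
--     "z": "%Z",  # timezone
--     "SSSSSS": "%f",  # microseconds
-- }
--
-- def _match_ldml_to_posix(ldml: str) -> tuple[int, str] | None: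
--     for k in _ldml_to_posix:
--         pos = ldml.find(k)
--         if pos != -1:
--             return pos, k
--
--     return None
--
-- def _ldml_to_posix_format(ldml: str) -> str:
--     res = _match_ldml_to_posix(ldml)
--     if res is None:
--         return ldml
--
--     pos, k = res
--
--     return (
--         _ldml_to_posix_format(ldml[:pos])
--         + _ldml_to_posix[k]
--         + _ldml_to_posix_format(ldml[pos + len(k) :])
--     )
-- ===== SOURCE B (Python) =====
-- # Run-length based translation: every LDML pattern key is a run of one repeated
-- # character, so split the input into maximal runs and translate each run by
-- # greedily consuming the longest applicable pattern length for that character.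
-- _RUN_RULES = {
--     "a": [(1, "%p")],
--     "d": [(2, "%d"), (1, "%e")],
--     "D": [(3, "%j"), (2, "%-j"), (1, "%-j")],
--     "E": [(4, "%A")],
--     "h": [(2, "%I"), (1, "%-I")],
--     "H": [(2, "%H"), (1, "%-H")],
--     "M": [(4, "%B"), (3, "%b"), (2, "%m"), (1, "%-m")],
--     "m": [(2, "%M"), (1, "%-M")],
--     "s": [(2, "%S"), (1, "%-S")],
--     "y": [(4, "%Y"), (2, "%y"), (1, "%Y")],
--     "S": [(6, "%f")],
--     "Z": [(1, "%Z")],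
--     "z": [(4, "%Z"), (1, "%Z")],
-- }
--
--
-- def _ldml_to_posix_format(ldml: str) -> str:
--     out = []
--     i = 0
--     n = len(ldml)
--     while i < n:
--         c = ldml[i]
--         j = i + 1
--         while j < n and ldml[j] == c:
--             j += 1
--         run = j - i
--         rules = _RUN_RULES.get(c)
--         if rules is None:
--             out.append(c * run)
--         else:
--             while run > 0:
--                 for klen, rep in rules:
--                     if klen <= run:
--                         out.append(rep)
--                         run -= klen
--                         break
--                 else:
--                     out.append(c * run)
--                     run = 0
--         i = j
--     return "".join(out)
-- ===== Notes on version B (the rewrite author's own statement) =====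
-- stated objective: faster
-- what changed: Replaced A's recursive find-first-dict-key-anywhere-then-split-and-recurse scheme (repeated substring searches over ever-smaller slices) by a run-length decomposition: every LDML key is a run of one repeated character, so B splits the input into maximal runs in one pass and translates each run by greedily consuming the longest applicable pattern length for that character.
import Mathlib
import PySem

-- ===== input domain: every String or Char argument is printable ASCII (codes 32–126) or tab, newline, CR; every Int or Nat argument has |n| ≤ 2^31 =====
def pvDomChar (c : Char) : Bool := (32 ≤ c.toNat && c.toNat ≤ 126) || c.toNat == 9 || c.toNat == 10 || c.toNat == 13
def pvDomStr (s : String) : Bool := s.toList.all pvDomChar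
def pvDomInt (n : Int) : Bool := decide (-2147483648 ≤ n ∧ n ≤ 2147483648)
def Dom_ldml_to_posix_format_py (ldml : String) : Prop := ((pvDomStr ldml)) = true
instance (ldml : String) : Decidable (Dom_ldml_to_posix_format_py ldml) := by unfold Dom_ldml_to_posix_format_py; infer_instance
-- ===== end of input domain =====

-- B replaces A's recursive "find first table key anywhere, split, recurse on both halves"
-- by a run-length decomposition: every table key is a run of one repeated character, so B
-- splits the input into maximal runs and translates each run arithmetically
-- (objective: faster — one pass over the input instead of repeated whole-string searches).

-- ===== PORT A =====
-- the module-level dict _ldml_to_posix, in insertion order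
def pvTbl : List (List Char × List Char) := [
  (['a'], ['%','p']),
  (['d','d'], ['%','d']),
  (['d'], ['%','e']),
  (['D','D','D'], ['%','j']),
  (['D','D'], ['%','-','j']),
  (['D'], ['%','-','j']),
  (['E','E','E','E'], ['%','A']),
  (['h','h'], ['%','I']),
  (['h'], ['%','-','I']),
  (['H','H'], ['%','H']),
  (['H'], ['%','-','H']),
  (['M','M','M','M'], ['%','B']),
  (['M','M','M'], ['%','b']),
  (['M','M'], ['%','m']),
  (['M'], ['%','-','m']),
  (['m','m'], ['%','M']),
  (['m'], ['%','-','M']),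
  (['s','s'], ['%','S']),
  (['s'], ['%','-','S']),
  (['y','y','y','y'], ['%','Y']),
  (['y','y'], ['%','y']),
  (['y'], ['%','Y']),
  (['Z'], ['%','Z']),
  (['z','z','z','z'], ['%','Z']),
  (['z'], ['%','Z']),
  (['S','S','S','S','S','S'], ['%','f'])]

-- dict lookup _ldml_to_posix[k] (first matching key)
def pvLookup (k : List Char) : List Char :=
  (((pvTbl.find? (fun e => e.1 == k)).map Prod.snd).getD [])

-- _match_ldml_to_posix: for k in dict: pos = ldml.find(k); if pos != -1: return pos, k
def pvMatch : List (List Char × List Char) → List Char → Option (Int × List Char)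
  | [], _ => none
  | (k, _) :: rest, s =>
    let pos := PySem.Chars.find s k
    if pos ≠ -1 then some (pos, k) else pvMatch rest s

-- _ldml_to_posix_format, on the char list of the string; the recursion is run with a
-- fuel bound (s.length suffices: every recursive call is on a strictly shorter slice)
def ldmlAF : Nat → List Char → List Char
  | 0, s => s
  | fuel+1, s =>
    match pvMatch pvTbl s with
    | none => s
    | some (pos, k) =>
        ldmlAF fuel (PySem.List.slice s none (some pos)) ++ pvLookup k ++
          ldmlAF fuel (PySem.List.slice s (some (pos + (k.length : Int))) none)

def ldmlA (s : List Char) : List Char := ldmlAF s.length s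

def ldml_to_posix_format_py (ldml : String) : String := String.ofList (ldmlA ldml.toList)

-- ===== PORT B =====
-- the module-level dict _RUN_RULES: for each pattern character, the usable pattern
-- lengths (longest first) with their POSIX replacements
def pvRunRules : PySem.Dict Char (List (Nat × List Char)) := PySem.Dict.ofList [
  ('a', [(1, "%p".toList)]),
  ('d', [(2, "%d".toList), (1, "%e".toList)]),
  ('D', [(3, "%j".toList), (2, "%-j".toList), (1, "%-j".toList)]),
  ('E', [(4, "%A".toList)]),
  ('h', [(2, "%I".toList), (1, "%-I".toList)]),
  ('H', [(2, "%H".toList), (1, "%-H".toList)]),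
  ('M', [(4, "%B".toList), (3, "%b".toList), (2, "%m".toList), (1, "%-m".toList)]),
  ('m', [(2, "%M".toList), (1, "%-M".toList)]),
  ('s', [(2, "%S".toList), (1, "%-S".toList)]),
  ('y', [(4, "%Y".toList), (2, "%y".toList), (1, "%Y".toList)]),
  ('S', [(6, "%f".toList)]),
  ('Z', [(1, "%Z".toList)]),
  ('z', [(4, "%Z".toList), (1, "%Z".toList)])]

-- the inner "while run > 0: for klen, rep in rules: …" loop; the for-else picks the first
-- (i.e. longest) rule length ≤ run. Run as recursion with fuel = the initial run length,
-- which bounds the iteration count since every rule length is ≥ 1.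
def pvConsume : Nat → List (Nat × List Char) → Char → Nat → List Char
  | 0, _, c, r => List.replicate r c
  | fuel+1, rules, c, r =>
    if r = 0 then [] else
    match rules.find? (fun p => decide (p.1 ≤ r)) with
    | some kr => kr.2 ++ pvConsume fuel rules c (r - kr.1)
    | none => List.replicate r c

-- the outer while loop: peel off the maximal run of the leading character, translate it,
-- continue after it
def pvRle : List Char → List Char
  | [] => []
  | c :: t =>
    let run := (t.takeWhile (fun x => x == c)).length + 1
    (match PySem.Dict.get? pvRunRules c with
     | none => List.replicate run c
     | some rules => pvConsume run rules c run) ++ pvRle (t.dropWhile (fun x => x == c))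
termination_by s => s.length
decreasing_by simpa using Nat.lt_succ_of_le (List.length_dropWhile_le _ t)

def ldml_to_posix_format_py_alt (ldml : String) : String := String.ofList (pvRle ldml.toList)

-- ===== PRECONDITION & SPEC =====
def Spec_ldml_to_posix_format_py (ldml : String) (out : String) : Prop := out = ldml_to_posix_format_py_alt ldml
instance (ldml : String) (out : String) : Decidable (Spec_ldml_to_posix_format_py ldml out) := by unfold Spec_ldml_to_posix_format_py; infer_instance

-- ===== CLAIM (what is proved, stated in full; the proofs are below) =====
def Claim_equal_ldml_to_posix_format_py : Prop := ∀ (ldml : String), Dom_ldml_to_posix_format_py ldml → Spec_ldml_to_posix_format_py ldml (ldml_to_posix_format_py ldml)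

-- ===== LEMMAS AND PROOFS =====

-- The proof goes through an intermediate description of A: a left-to-right scan that at
-- each position takes the longest table key starting there ("greedy"), with the keys
-- pre-sorted by length. Part 1 (split_lemma/mainA, from A's side) shows A = greedy;
-- part 2 (run lemmas, from B's side) shows greedy = B, because keys are single-char runs,
-- so greedy matches never cross the boundaries of B's maximal runs.

-- the key list of the dict, in dict order
def pvTblKeys : List (List Char) := pvTbl.map Prod.fst

-- the table keys ordered by nonincreasing length (proof-side description of A)
def pvKeys : List (List Char) := [
  ['S','S','S','S','S','S'],
  ['E','E','E','E'], ['M','M','M','M'], ['y','y','y','y'], ['z','z','z','z'],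
  ['D','D','D'], ['M','M','M'],
  ['d','d'], ['D','D'], ['h','h'], ['H','H'], ['M','M'], ['m','m'], ['s','s'], ['y','y'],
  ['a'], ['d'], ['D'], ['h'], ['H'], ['M'], ['m'], ['s'], ['y'], ['Z'], ['z']]

-- greedy longest-match scan, fuel = remaining length
def greedyF : Nat → List Char → List Char
  | 0, _ => []
  | _+1, [] => []
  | fuel+1, c :: t =>
    match pvKeys.find? (fun k => PySem.Chars.startswith (c :: t) k) with
    | some k => pvLookup k ++ greedyF fuel ((c :: t).drop k.length)
    | none => c :: greedyF fuel t

def greedy (s : List Char) : List Char := greedyF s.length s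

theorem pvKeys_ne_nil : ∀ k ∈ pvKeys, k ≠ [] := by decide

theorem pvTbl_keys_ne : ∀ e ∈ pvTbl, e.1 ≠ [] := by decide

theorem pvMatch_some : ∀ {t : List (List Char × List Char)} {s : List Char} {pos : Int} {k : List Char},
    pvMatch t s = some (pos, k) →
    ∃ t1 v t2, t = t1 ++ (k, v) :: t2 ∧ pos = PySem.Chars.find s k ∧
      PySem.Chars.find s k ≠ -1 ∧ ∀ e ∈ t1, PySem.Chars.find s e.1 = -1 := by
  intro t
  induction t with
  | nil => intro s pos k h; simp [pvMatch] at h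
  | cons e rest ih =>
    intro s pos k h
    obtain ⟨k', v'⟩ := e
    simp only [pvMatch] at h
    by_cases hf : PySem.Chars.find s k' ≠ -1
    · simp [hf] at h
      obtain ⟨h1, h2⟩ := h
      exact ⟨[], v', rest, by simp [h2], by simp [h2, ← h1], by rw [← h2]; exact hf, by simp⟩
    · simp [hf] at h
      push_neg at hf
      obtain ⟨t1, v, t2, hdec, h1, h2, h3⟩ := ih h
      exact ⟨(k', v') :: t1, v, t2, by simp [hdec], h1, h2, by
        intro e he
        rcases List.mem_cons.mp he with h | h
        · rw [h]; exact hf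
        · exact h3 e h⟩

theorem pvMatch_bounds {s : List Char} {pos : Int} {k : List Char}
    (h : pvMatch pvTbl s = some (pos, k)) :
    0 ≤ pos ∧ pos.toNat + k.length ≤ s.length ∧ 1 ≤ k.length := by
  obtain ⟨t1, v, t2, hdec, h1, h2, _⟩ := pvMatch_some h
  have hinf : k <:+: s := (PySem.Chars.find_ne_neg_one_iff _ _).mp h2
  have h0 : 0 ≤ PySem.Chars.find s k := (PySem.Chars.find_nonneg_iff _ _).mpr hinf
  have hspec := PySem.Chars.find_spec (s := s) (sub := k) h0
  have hlen : k.length ≤ (s.drop (PySem.Chars.find s k).toNat).length := hspec.1.length_le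
  have hle : PySem.Chars.find s k ≤ s.length := PySem.Chars.find_le_length (s := s) (sub := k)
  have hkmem : (k, v) ∈ pvTbl := by rw [hdec]; simp
  have hkne : k ≠ [] := pvTbl_keys_ne (k, v) hkmem
  have hk1 : 1 ≤ k.length := List.length_pos_iff.mpr hkne
  simp only [List.length_drop] at hlen
  refine ⟨by rw [h1]; exact h0, ?_, hk1⟩
  rw [h1]
  omega

theorem pvMatch_nil : pvMatch pvTbl [] = none := by decide

-- fuel irrelevance: any fuel at least the length computes the same value
theorem greedyF_nil : ∀ f, greedyF f [] = [] := by
  intro f; cases f <;> rfl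

theorem greedyF_irrel : ∀ f1 f2 : Nat, ∀ s : List Char, s.length ≤ f1 → s.length ≤ f2 →
    greedyF f1 s = greedyF f2 s := by
  intro f1
  induction f1 with
  | zero =>
    intro f2 s h1 _
    have hs : s = [] := List.eq_nil_of_length_eq_zero (by omega)
    subst hs
    rw [greedyF_nil, greedyF_nil]
  | succ f ih =>
    intro f2 s h1 h2
    cases s with
    | nil => rw [greedyF_nil, greedyF_nil]
    | cons c t =>
      cases f2 with
      | zero => simp at h2
      | succ g =>
        cases hfp : pvKeys.find? (fun k => PySem.Chars.startswith (c :: t) k) with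
        | some k =>
          have hne := pvKeys_ne_nil _ (List.mem_of_find?_eq_some hfp)
          have hk1 : 1 ≤ k.length := List.length_pos_iff.mpr hne
          simp only [List.length_cons] at h1 h2
          simp only [greedyF, hfp]
          rw [ih g _ (by simp only [List.length_drop, List.length_cons]; omega)
            (by simp only [List.length_drop, List.length_cons]; omega)]
        | none =>
          simp only [List.length_cons] at h1 h2
          simp only [greedyF, hfp]
          rw [ih g t (by omega) (by omega)]

theorem ldmlAF_nil : ∀ f, ldmlAF f [] = [] := by
  intro f
  cases f with
  | zero => rfl
  | succ g => simp [ldmlAF, pvMatch_nil]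

theorem ldmlAF_irrel : ∀ f1 f2 : Nat, ∀ s : List Char, s.length ≤ f1 → s.length ≤ f2 →
    ldmlAF f1 s = ldmlAF f2 s := by
  intro f1
  induction f1 with
  | zero =>
    intro f2 s h1 _
    have hs : s = [] := List.eq_nil_of_length_eq_zero (by omega)
    subst hs
    rw [ldmlAF_nil, ldmlAF_nil]
  | succ f ih =>
    intro f2 s h1 h2
    cases f2 with
    | zero =>
      have hs : s = [] := List.eq_nil_of_length_eq_zero (by omega)
      subst hs
      rw [ldmlAF_nil, ldmlAF_nil]
    | succ g =>
      cases hm : pvMatch pvTbl s with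
      | none => simp only [ldmlAF, hm]
      | some pk =>
        obtain ⟨pos, k⟩ := pk
        obtain ⟨h0, hb1, hb2⟩ := pvMatch_bounds hm
        simp only [ldmlAF, hm]
        rw [PySem.List.slice_to s h0, PySem.List.slice_from s (by omega)]
        rw [show (pos + (k.length : Int)).toNat = pos.toNat + k.length from by omega]
        rw [ih g _ (by simp only [List.length_take]; omega) (by simp only [List.length_take]; omega)]
        rw [ih g _ (by simp only [List.length_drop]; omega) (by simp only [List.length_drop]; omega)]

-- every key is a nonempty run of a single character
theorem L_run : ∀ k ∈ pvTblKeys, k ≠ [] ∧ k = List.replicate k.length (k.headD 'x') := by decide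

-- at or after a key in dict order, keys starting with the same character are no longer
theorem L_after : ∀ suf ∈ pvTblKeys.tails, ∀ y ∈ suf,
    y.headD 'x' = (suf.headD []).headD 'x' → y.length ≤ (suf.headD []).length := by decide

-- pvKeys is ordered by nonincreasing length
theorem L_sortB : ∀ suf ∈ pvKeys.tails, ∀ y ∈ suf.drop 1, y.length ≤ (suf.headD []).length := by decide

theorem L_nodupB : pvKeys.Nodup := by decide

theorem L_sub1 : ∀ k ∈ pvKeys, k ∈ pvTblKeys := by decide

theorem L_sub2 : ∀ k ∈ pvTblKeys, k ∈ pvKeys := by decide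

-- find? over a decomposition whose front all fails
theorem find?_eq_of_decomp {α : Type} (q : α → Bool) (l1 l2 : List α) (k : α)
    (hk : q k = true) (hb : ∀ y ∈ l1, q y = false) :
    (l1 ++ k :: l2).find? q = some k := by
  induction l1 with
  | nil => simp [hk]
  | cons a as ih =>
    have ha := hb a (by simp)
    simp only [List.cons_append, List.find?_cons, ha]
    exact ih (fun y hy => hb y (by simp [hy]))

theorem find?_some_decomp {α : Type} (q : α → Bool) (l : List α) (x : α)
    (h : l.find? q = some x) : ∃ l1 l2, l = l1 ++ x :: l2 ∧ ∀ y ∈ l1, q y = false := by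
  induction l with
  | nil => simp [List.find?] at h
  | cons a as ih =>
    by_cases hq : q a = true
    · rw [List.find?_cons_of_pos hq] at h
      exact ⟨[], as, by simp [(Option.some.injEq _ _).mp h], by simp⟩
    · rw [List.find?_cons_of_neg (by simpa using hq)] at h
      obtain ⟨l1, l2, hdec, hall⟩ := ih h
      exact ⟨a :: l1, l2, by simp [hdec], by
        intro y hy
        rcases List.mem_cons.mp hy with h' | h'
        · rw [h']; simpa using hq
        · exact hall y h'⟩

-- replicate-prefix characterisation via getElem?
theorem repl_prefix {n : Nat} {c : Char} {s : List Char} :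
    List.replicate n c <+: s ↔ n ≤ s.length ∧ ∀ i, i < n → s[i]? = some c := by
  constructor
  · intro h
    obtain ⟨t, ht⟩ := h
    have hlen : n ≤ s.length := by
      have := congrArg List.length ht
      simp at this
      omega
    refine ⟨hlen, fun i hi => ?_⟩
    rw [← ht]
    rw [List.getElem?_append_left (by simpa using hi)]
    simp [List.getElem?_replicate, hi]
  · rintro ⟨hn, hi⟩
    have : List.replicate n c = s.take n := by
      apply List.ext_getElem?
      intro i
      by_cases h : i < n
      · rw [List.getElem?_take_of_lt h, hi i h]
        simp [List.getElem?_replicate, h]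
      · have h1 : (List.replicate n c)[i]? = none := by
          simp [List.getElem?_replicate, h]
        have h2 : (s.take n)[i]? = none := by
          apply List.getElem?_eq_none
          simp; omega
        rw [h1, h2]
    rw [this]
    exact List.take_prefix n s

theorem occ_iff {n : Nat} {c : Char} {s : List Char} {p : Nat} (hp : p ≤ s.length) :
    List.replicate n c <+: s.drop p ↔ p + n ≤ s.length ∧ ∀ i, i < n → s[p + i]? = some c := by
  rw [repl_prefix]
  simp only [List.length_drop, List.getElem?_drop]
  constructor
  · rintro ⟨h1, h2⟩; exact ⟨by omega, h2⟩
  · rintro ⟨h1, h2⟩; exact ⟨by omega, h2⟩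

-- two overlapping runs merge: an occurrence of a long-enough run inside a run-prefix
-- reaches back to position 0
theorem overlap {s : List Char} {c ck : Char} {lL lk p : Nat}
    (hL : List.replicate lL c <+: s) (hk : List.replicate lk ck <+: s.drop p)
    (hlk : 1 ≤ lk) (hple : p ≤ s.length) (hp : p < lL) (hlen : lL ≤ lk) :
    List.replicate lk ck <+: s := by
  obtain ⟨hLlen, hLi⟩ := repl_prefix.mp hL
  obtain ⟨hsum, hki⟩ := (occ_iff hple).mp hk
  have hcc : ck = c := by
    have h1 := hki 0 (by omega)
    have h2 := hLi p hp
    rw [Nat.add_zero] at h1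
    rw [h1] at h2
    exact (Option.some.injEq _ _).mp h2
  subst hcc
  rw [repl_prefix]
  refine ⟨by omega, fun i hi => ?_⟩
  by_cases h : i < lL
  · exact hLi i h
  · have := hki (i - p) (by omega)
    rwa [show p + (i - p) = i from by omega] at this

theorem prefix_headD {k s : List Char} (h : k <+: s) (hne : k ≠ []) :
    k.headD 'x' = s.headD 'x' := by
  obtain ⟨t, ht⟩ := h
  cases k with
  | nil => exact absurd rfl hne
  | cons a l => rw [← ht]; simp

theorem pvMatch_none : ∀ {t : List (List Char × List Char)} {s : List Char},
    pvMatch t s = none → ∀ e ∈ t, PySem.Chars.find s e.1 = -1 := by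
  intro t
  induction t with
  | nil => intro s _ e he; simp at he
  | cons a rest ih =>
    intro s h e he
    obtain ⟨k', v'⟩ := a
    simp only [pvMatch] at h
    by_cases hf : PySem.Chars.find s k' ≠ -1
    · simp [hf] at h
    · simp [hf] at h
      push_neg at hf
      rcases List.mem_cons.mp he with h' | h'
      · rw [h']; exact hf
      · exact ih h e h'

-- unfolding lemmas for greedy and A
theorem greedy_nil : greedy [] = [] := rfl

theorem greedy_cons_some {c : Char} {t k : List Char}
    (h : pvKeys.find? (fun x => PySem.Chars.startswith (c :: t) x) = some k) :
    greedy (c :: t) = pvLookup k ++ greedy ((c :: t).drop k.length) := by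
  have hne := pvKeys_ne_nil _ (List.mem_of_find?_eq_some h)
  have hk1 : 1 ≤ k.length := List.length_pos_iff.mpr hne
  unfold greedy
  simp only [List.length_cons, greedyF, h]
  rw [greedyF_irrel t.length ((c :: t).drop k.length).length _ (by simp; omega) (by simp)]

theorem greedy_cons_none {c : Char} {t : List Char}
    (h : pvKeys.find? (fun x => PySem.Chars.startswith (c :: t) x) = none) :
    greedy (c :: t) = c :: greedy t := by
  unfold greedy
  simp only [List.length_cons, greedyF, h]

theorem greedy_some {s k : List Char} (hne : s ≠ [])
    (h : pvKeys.find? (fun x => PySem.Chars.startswith s x) = some k) :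
    greedy s = pvLookup k ++ greedy (s.drop k.length) := by
  obtain ⟨c, t, rfl⟩ := List.exists_cons_of_ne_nil hne
  exact greedy_cons_some h

theorem ldmlA_none {s : List Char} (h : pvMatch pvTbl s = none) : ldmlA s = s := by
  unfold ldmlA
  cases hl : s.length with
  | zero => rfl
  | succ m => simp only [ldmlAF, h]

theorem ldmlA_some {s : List Char} {pos : Int} {k : List Char}
    (h : pvMatch pvTbl s = some (pos, k)) :
    ldmlA s = ldmlA (PySem.List.slice s none (some pos)) ++ pvLookup k ++
      ldmlA (PySem.List.slice s (some (pos + (k.length : Int))) none) := by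
  obtain ⟨h0, hb1, hb2⟩ := pvMatch_bounds h
  obtain ⟨m, hm⟩ : ∃ m, s.length = m + 1 := ⟨s.length - 1, by omega⟩
  unfold ldmlA
  rw [hm]
  simp only [ldmlAF, h]
  rw [PySem.List.slice_to s h0, PySem.List.slice_from s (by omega)]
  rw [show (pos + (k.length : Int)).toNat = pos.toNat + k.length from by omega]
  rw [ldmlAF_irrel m (s.take pos.toNat).length _ (by simp; omega) (by simp)]
  rw [ldmlAF_irrel m (s.drop (pos.toNat + k.length)).length _ (by simp; omega) (by simp)]

-- greedy copies a string none of the keys occurs in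
theorem no_match : ∀ s : List Char, (∀ y ∈ pvKeys, ¬ y <:+: s) → greedy s = s := by
  intro s
  induction s with
  | nil => intro _; exact greedy_nil
  | cons c t ih =>
    intro h
    have hf : pvKeys.find? (fun x => PySem.Chars.startswith (c :: t) x) = none := by
      apply List.find?_eq_none.mpr
      intro x hx
      simp only [Bool.not_eq_true]
      by_contra hq
      simp only [Bool.not_eq_false] at hq
      exact h x hx ((PySem.Chars.startswith_iff _ _).mp hq).isInfix
    rw [greedy_cons_none hf]
    rw [ih (fun y hy hin => h y hy (hin.trans (List.suffix_cons c t).isInfix))]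

-- THE ENGINE of part 1: if (p, k) is A's chosen match (k the dict-first key occurring in
-- s, p its leftmost occurrence), then the greedy scan splits at exactly that match.
theorem split_lemma (B Aft : List (List Char)) (k : List Char)
    (hdec : pvTblKeys = B ++ k :: Aft) :
    ∀ p : Nat, ∀ s : List Char, k <+: s.drop p → (∀ i, i < p → ¬ k <+: s.drop i) →
      (∀ b ∈ B, ¬ b <:+: s) →
      greedy s = greedy (s.take p) ++ pvLookup k ++ greedy (s.drop (p + k.length)) := by
  intro p
  induction p using Nat.strong_induction_on with
  | _ p IH =>
  intro s h2 h3 h4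
  have hkmem : k ∈ pvTblKeys := by rw [hdec]; simp
  obtain ⟨hkne, hkrun⟩ := L_run k hkmem
  have hkB : k ∈ pvKeys := L_sub2 k hkmem
  have hklen : 1 ≤ k.length := List.length_pos_iff.mpr hkne
  have hs_ne : s ≠ [] := by
    intro h
    subst h
    simp only [List.drop_nil] at h2
    exact hkne (List.prefix_nil.mp h2)
  have hple : p ≤ s.length := by
    by_contra h
    push_neg at h
    have hd : s.drop p = [] := List.drop_eq_nil_of_le (by omega)
    rw [hd] at h2
    exact hkne (List.prefix_nil.mp h2)
  have hsuf_tbl : k :: Aft ∈ pvTblKeys.tails := (List.mem_tails _ _).mpr ⟨B, hdec.symm⟩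
  by_cases hp0 : p = 0
  · -- the match is at the front: the greedy scan picks exactly k here
    subst hp0
    have hkpre : k <+: s := by simpa using h2
    obtain ⟨l1, l2, hKdec⟩ := List.append_of_mem hkB
    have hbefore : ∀ y ∈ l1, (PySem.Chars.startswith s y) = false := by
      intro y hy
      by_contra hq
      simp only [Bool.not_eq_false] at hq
      have hypre : y <+: s := (PySem.Chars.startswith_iff _ _).mp hq
      have hyK : y ∈ pvKeys := by rw [hKdec]; simp [hy]
      have hyT : y ∈ pvTblKeys := L_sub1 y hyK
      obtain ⟨hyne, _⟩ := L_run y hyT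
      have hynotB : y ∉ B := fun hb => h4 y hb hypre.isInfix
      have hyAfter : y ∈ k :: Aft := by
        have hmem : y ∈ B ++ k :: Aft := hdec ▸ hyT
        rcases List.mem_append.mp hmem with h' | h'
        · exact absurd h' hynotB
        · exact h'
      have hhead : y.headD 'x' = k.headD 'x' := by
        rw [prefix_headD hypre hyne, prefix_headD hkpre hkne]
      have hyk_le : y.length ≤ k.length := by
        have hh : y.headD 'x' = ((k :: Aft).headD []).headD 'x' := by
          simp only [List.headD_cons]; exact hhead
        simpa only [List.headD_cons] using L_after (k :: Aft) hsuf_tbl y hyAfter hh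
      have hky_le : k.length ≤ y.length := by
        obtain ⟨a, b, hl1⟩ := List.append_of_mem hy
        have hsuf : y :: (b ++ k :: l2) ∈ pvKeys.tails :=
          (List.mem_tails _ _).mpr ⟨a, by rw [hKdec, hl1]; simp⟩
        simpa only [List.headD_cons] using L_sortB _ hsuf k (by simp)
      have hyk : y = k := by
        rcases List.prefix_or_prefix_of_prefix hypre hkpre with h' | h'
        · exact h'.eq_of_length (by omega)
        · exact (h'.eq_of_length (by omega)).symm
      subst hyk
      have hnd := L_nodupB
      rw [hKdec] at hnd
      exact (List.disjoint_of_nodup_append hnd) hy (by simp)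
    have hfind : pvKeys.find? (fun x => PySem.Chars.startswith s x) = some k := by
      rw [hKdec]
      exact find?_eq_of_decomp _ _ _ _ ((PySem.Chars.startswith_iff _ _).mpr hkpre) hbefore
    rw [greedy_some hs_ne hfind]
    simp [greedy_nil]
  · -- the match is further right
    have hppos : 0 < p := Nat.pos_of_ne_zero hp0
    obtain ⟨c, t, rfl⟩ := List.exists_cons_of_ne_nil hs_ne
    obtain ⟨n, rfl⟩ : ∃ n, p = n + 1 := ⟨p - 1, by omega⟩
    cases hfp : pvKeys.find? (fun x => PySem.Chars.startswith (c :: t) x) with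
    | none =>
      have hLnone := List.find?_eq_none.mp hfp
      have h2' : k <+: t.drop n := by simpa [List.drop_succ_cons] using h2
      have h3' : ∀ i, i < n → ¬ k <+: t.drop i := by
        intro i hi
        have := h3 (i + 1) (by omega)
        simpa [List.drop_succ_cons] using this
      have h4' : ∀ b ∈ B, ¬ b <:+: t := fun b hb hbin =>
        h4 b hb (hbin.trans (List.suffix_cons c t).isInfix)
      have hrec := IH n (by omega) t h2' h3' h4'
      have hfp2 : pvKeys.find? (fun x => PySem.Chars.startswith (c :: t.take n) x) = none := by
        apply List.find?_eq_none.mpr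
        intro x hx
        simp only [Bool.not_eq_true]
        by_contra hq
        simp only [Bool.not_eq_false] at hq
        have hxpre : x <+: c :: t.take n := (PySem.Chars.startswith_iff _ _).mp hq
        have hx2 : x <+: c :: t := hxpre.trans (by
          have : t.take n <+: t := List.take_prefix n t
          exact (List.cons_prefix_cons.mpr ⟨rfl, this⟩))
        have := hLnone x hx
        rw [(PySem.Chars.startswith_iff _ _).mpr hx2] at this
        exact this rfl
      rw [greedy_cons_none hfp]
      rw [show (c :: t).take (n + 1) = c :: t.take n from by simp [List.take_succ_cons]]
      rw [greedy_cons_none hfp2, hrec]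
      rw [show (c :: t).drop (n + 1 + k.length) = t.drop (n + k.length) from by
        rw [show n + 1 + k.length = (n + k.length) + 1 from by omega, List.drop_succ_cons]]
      simp
    | some L =>
      have hLmem : L ∈ pvKeys := List.mem_of_find?_eq_some hfp
      have hLq := List.find?_some hfp
      have hLpre : L <+: c :: t := (PySem.Chars.startswith_iff _ _).mp hLq
      have hLT : L ∈ pvTblKeys := L_sub1 _ hLmem
      obtain ⟨hLne, hLrun⟩ := L_run L hLT
      have hLpos : 1 ≤ L.length := List.length_pos_iff.mpr hLne
      have hLnotB : L ∉ B := fun hb => h4 L hb hLpre.isInfix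
      have hLAfter : L ∈ k :: Aft := by
        have hmem : L ∈ B ++ k :: Aft := hdec ▸ hLT
        rcases List.mem_append.mp hmem with h' | h'
        · exact absurd h' hLnotB
        · exact h'
      -- the front match cannot reach past position p: otherwise k would occur at 0
      have hLp : L.length ≤ n + 1 := by
        by_contra hlt
        push_neg at hlt
        have hkocc : List.replicate k.length (k.headD 'x') <+: (c :: t).drop (n + 1) := by
          rw [← hkrun]; exact h2
        have hLpre' : List.replicate L.length (L.headD 'x') <+: (c :: t) := by
          rw [← hLrun]; exact hLpre
        have hck : k.headD 'x' = L.headD 'x' := by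
          obtain ⟨hl1, hl2⟩ := repl_prefix.mp hLpre'
          obtain ⟨ho1, ho2⟩ := (occ_iff hple).mp hkocc
          have e1 := ho2 0 (by omega)
          have e2 := hl2 (n + 1) (by omega)
          rw [Nat.add_zero] at e1
          rw [e1] at e2
          exact (Option.some.injEq _ _).mp e2
        have hLk : L.length ≤ k.length := by
          have hh : L.headD 'x' = ((k :: Aft).headD []).headD 'x' := by
            simp only [List.headD_cons]; exact hck.symm
          simpa only [List.headD_cons] using L_after (k :: Aft) hsuf_tbl L hLAfter hh
        have hocc0 : List.replicate k.length (k.headD 'x') <+: (c :: t) :=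
          overlap hLpre' hkocc hklen hple hlt hLk
        have hk0 : k <+: (c :: t).drop 0 := by
          simpa using (hkrun ▸ hocc0)
        exact h3 0 hppos hk0
      obtain ⟨l1, l2, hKdec, hKall⟩ := find?_some_decomp _ _ _ hfp
      have hfp2 : pvKeys.find? (fun x => PySem.Chars.startswith ((c :: t).take (n + 1)) x) = some L := by
        rw [hKdec]
        apply find?_eq_of_decomp
        · exact (PySem.Chars.startswith_iff _ _).mpr (List.prefix_take_iff.mpr ⟨hLpre, hLp⟩)
        · intro y hy
          by_contra hq
          simp only [Bool.not_eq_false] at hq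
          have hypre : y <+: c :: t :=
            ((PySem.Chars.startswith_iff _ _).mp hq).trans (List.take_prefix _ _)
          have := hKall y hy
          rw [(PySem.Chars.startswith_iff _ _).mpr hypre] at this
          exact absurd this (by simp)
      have htne : (c :: t).take (n + 1) ≠ [] := by simp [List.take_succ_cons]
      rw [greedy_cons_some hfp, greedy_some htne hfp2]
      have h2' : k <+: ((c :: t).drop L.length).drop (n + 1 - L.length) := by
        rw [List.drop_drop]
        rwa [show L.length + (n + 1 - L.length) = n + 1 from by omega]
      have h3' : ∀ i, i < n + 1 - L.length → ¬ k <+: ((c :: t).drop L.length).drop i := by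
        intro i hi
        rw [List.drop_drop]
        exact h3 (L.length + i) (by omega)
      have h4' : ∀ b ∈ B, ¬ b <:+: (c :: t).drop L.length := fun b hb hbin =>
        h4 b hb (hbin.trans (List.drop_suffix _ _).isInfix)
      have hrec := IH (n + 1 - L.length) (by omega) _ h2' h3' h4'
      rw [show ((c :: t).take (n + 1)).drop L.length = ((c :: t).drop L.length).take (n + 1 - L.length) from List.drop_take ..]
      rw [hrec]
      rw [show ((c :: t).drop L.length).drop (n + 1 - L.length + k.length) = (c :: t).drop (n + 1 + k.length) from by
        rw [List.drop_drop]
        congr 1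
        omega]
      simp

-- part 1: A = greedy on char lists
theorem mainA (s : List Char) : ldmlA s = greedy s := by
  induction hs : s.length using Nat.strong_induction_on generalizing s with
  | _ n IH =>
  subst hs
  cases hm : pvMatch pvTbl s with
  | none =>
    rw [ldmlA_none hm]
    have hnone := pvMatch_none hm
    symm
    apply no_match
    intro y hy hin
    have hyT : y ∈ pvTblKeys := L_sub1 y hy
    obtain ⟨e, he, hey⟩ := List.mem_map.mp hyT
    have := hnone e he
    rw [hey] at this
    exact ((PySem.Chars.find_eq_neg_one_iff _ _).mp this) hin
  | some pk =>
    obtain ⟨pos, k⟩ := pk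
    obtain ⟨t1, v, t2, hdec, hpos, hneq, hbef⟩ := pvMatch_some hm
    obtain ⟨h0, hb1, hb2⟩ := pvMatch_bounds hm
    have h0' : 0 ≤ PySem.Chars.find s k := by rw [← hpos]; exact h0
    have hspec := PySem.Chars.find_spec (s := s) (sub := k) h0'
    have hpn : (PySem.Chars.find s k).toNat = pos.toNat := by rw [← hpos]
    have h2 : k <+: s.drop pos.toNat := by rw [← hpn]; exact hspec.1
    have h3 : ∀ i, i < pos.toNat → ¬ k <+: s.drop i := by
      intro i hi
      exact hspec.2 i (by omega)
    have h4 : ∀ b ∈ t1.map Prod.fst, ¬ b <:+: s := by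
      intro b hb hbin
      obtain ⟨e, he, heb⟩ := List.mem_map.mp hb
      have := hbef e he
      rw [heb] at this
      exact ((PySem.Chars.find_eq_neg_one_iff _ _).mp this) hbin
    have hdec' : pvTblKeys = t1.map Prod.fst ++ k :: t2.map Prod.fst := by
      unfold pvTblKeys
      rw [hdec]
      simp
    rw [ldmlA_some hm]
    rw [PySem.List.slice_to s h0, PySem.List.slice_from s (by omega)]
    rw [show (pos + (k.length : Int)).toNat = pos.toNat + k.length from by omega]
    rw [IH (s.take pos.toNat).length (by simp; omega) _ rfl]
    rw [IH (s.drop (pos.toNat + k.length)).length (by simp; omega) _ rfl]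
    exact (split_lemma (t1.map Prod.fst) (t2.map Prod.fst) k hdec' pos.toNat s h2 h3 h4).symm

-- ── part 2: greedy = B ──────────────────────────────────────────────────────

theorem find?_congr_mem {α : Type} {p q : α → Bool} : ∀ {l : List α},
    (∀ a ∈ l, p a = q a) → l.find? p = l.find? q := by
  intro l
  induction l with
  | nil => intro _; rfl
  | cons a t ih =>
    intro h
    have ha := h a (by simp)
    rw [List.find?_cons, List.find?_cons, ha, ih (fun x hx => h x (by simp [hx]))]

-- replicate-prefixes of s are exactly bounded by the leading run of s
theorem repl_prefix_iff (c : Char) : ∀ (s : List Char) (m : Nat),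
    (List.replicate m c <+: s ↔ m ≤ (s.takeWhile (fun x => x == c)).length) := by
  intro s
  induction s with
  | nil =>
    intro m
    simp [List.prefix_nil, List.replicate_eq_nil_iff]
  | cons a t ih =>
    intro m
    cases m with
    | zero => simp
    | succ m =>
      rw [List.replicate_succ, List.cons_prefix_cons, List.takeWhile_cons]
      by_cases hac : a = c
      · subst hac
        rw [if_pos (by simp), List.length_cons, ih m]
        constructor
        · rintro ⟨_, h⟩; omega
        · intro h; exact ⟨rfl, by omega⟩
      · rw [if_neg (by simpa using hac)]
        simp only [List.length_nil]
        constructor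
        · rintro ⟨h, _⟩; exact absurd h.symm hac
        · intro h; exact absurd h (by omega)

-- a table key (a nonempty single-character run) starts at the front of c :: t iff its
-- character is c and its length fits in the leading run
theorem key_startswith {k : List Char} (hk : k ∈ pvKeys) (c : Char) (t : List Char) :
    PySem.Chars.startswith (c :: t) k =
      (k.headD 'x' == c && decide (k.length ≤ (t.takeWhile (fun x => x == c)).length + 1)) := by
  obtain ⟨hne, hrun⟩ := L_run k (L_sub1 k hk)
  have hlen : 1 ≤ k.length := List.length_pos_iff.mpr hne
  rw [Bool.eq_iff_iff]
  rw [PySem.Chars.startswith_iff]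
  rw [Bool.and_eq_true, beq_iff_eq, decide_eq_true_iff]
  constructor
  · intro h
    have hh : k.headD 'x' = c := by
      rw [prefix_headD h hne]; rfl
    refine ⟨hh, ?_⟩
    rw [hrun, hh] at h
    have := (repl_prefix_iff c (c :: t) k.length).mp h
    rwa [List.takeWhile_cons, if_pos (by simp), List.length_cons] at this
  · rintro ⟨hh, hle⟩
    rw [hrun, hh]
    apply (repl_prefix_iff c (c :: t) k.length).mpr
    rwa [List.takeWhile_cons, if_pos (by simp), List.length_cons]

-- the greedy selection as a function of the leading character and the leading run length
def keySel (c : Char) (r : Nat) : Option (List Char) :=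
  pvKeys.find? (fun k => k.headD 'x' == c && decide (k.length ≤ r))

theorem find_eq_keySel (c : Char) (t : List Char) :
    pvKeys.find? (fun k => PySem.Chars.startswith (c :: t) k) =
      keySel c ((t.takeWhile (fun x => x == c)).length + 1) := by
  exact find?_congr_mem (fun k hk => key_startswith hk c t)

theorem keySel_none_mono {c : Char} {r r' : Nat} (h : keySel c r = none) (hle : r' ≤ r) :
    keySel c r' = none := by
  apply List.find?_eq_none.mpr
  intro k hk
  have h2 := List.find?_eq_none.mp h k hk
  simp only [Bool.not_eq_true, Bool.and_eq_false_iff, decide_eq_false_iff_not] at h2 ⊢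
  rcases h2 with h2 | h2
  · exact Or.inl h2
  · exact Or.inr (by omega)

-- pattern characters, rule lengths and key lengths: decidable table facts
theorem key_heads : ∀ k ∈ pvKeys, k.headD 'x' ∈ pvRunRules.keys := by decide

theorem key_lens : ∀ k ∈ pvKeys, k.length ≤ 6 := by decide

theorem rules_bounds : ∀ e ∈ pvRunRules.items, ∀ p ∈ e.2, 1 ≤ p.1 ∧ p.1 ≤ 6 := by decide

-- the crux table facts: for every pattern character and run length 1..6, the first rule
-- length that fits IS the greedy selection, and the rule replacements agree with A's dict
theorem rules_keySel : ∀ e ∈ pvRunRules.items, ∀ m ∈ [1, 2, 3, 4, 5, 6],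
    keySel e.1 m = (e.2.find? (fun p => decide (p.1 ≤ m))).map (fun kr => List.replicate kr.1 e.1) := by decide

theorem rules_lookup : ∀ e ∈ pvRunRules.items, ∀ p ∈ e.2,
    pvLookup (List.replicate p.1 e.1) = p.2 := by decide

-- both find?s only depend on min r 6
theorem rules_find_min6 {rules : List (Nat × List Char)} (h : ∀ p ∈ rules, 1 ≤ p.1 ∧ p.1 ≤ 6)
    (r : Nat) : rules.find? (fun p => decide (p.1 ≤ r)) = rules.find? (fun p => decide (p.1 ≤ min r 6)) := by
  apply find?_congr_mem
  intro p hp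
  have := h p hp
  apply decide_eq_decide.mpr
  omega

theorem keySel_min6 (c : Char) (r : Nat) : keySel c r = keySel c (min r 6) := by
  apply find?_congr_mem
  intro k hk
  have := key_lens k hk
  congr 1
  apply decide_eq_decide.mpr
  omega

theorem min6_mem {r : Nat} (h : 1 ≤ r) : min r 6 ∈ [1, 2, 3, 4, 5, 6] := by
  simp only [List.mem_cons, List.not_mem_nil, or_false]
  omega

-- pvConsume: fuel irrelevance, given positive rule lengths
theorem pvConsume_zero (rules : List (Nat × List Char)) (c : Char) :
    ∀ f, pvConsume f rules c 0 = [] := by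
  intro f
  cases f with
  | zero => rfl
  | succ g => simp [pvConsume]

-- the leading run of (replicate r c ++ rest) is exactly r when rest does not begin with c
theorem takeWhile_repl_append (c : Char) (rest : List Char)
    (hrest : rest.takeWhile (fun x => x == c) = []) :
    ∀ r, ((List.replicate r c ++ rest).takeWhile (fun x => x == c)).length = r := by
  intro r
  induction r with
  | zero => simp only [List.replicate_zero, List.nil_append, hrest, List.length_nil]
  | succ n ih =>
    rw [List.replicate_succ, List.cons_append, List.takeWhile_cons, if_pos (by simp)]
    rw [List.length_cons, ih]

-- a run whose length admits no greedy selection is copied verbatim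
theorem run_lit (c : Char) (rest : List Char)
    (hrest : rest.takeWhile (fun x => x == c) = []) :
    ∀ r, keySel c r = none →
      greedy (List.replicate r c ++ rest) = List.replicate r c ++ greedy rest := by
  intro r
  induction r with
  | zero => intro _; simp
  | succ n ih =>
    intro hsel
    rw [List.replicate_succ, List.cons_append]
    have hfind : pvKeys.find? (fun k => PySem.Chars.startswith (c :: (List.replicate n c ++ rest)) k) = none := by
      rw [find_eq_keySel]
      rw [takeWhile_repl_append c rest hrest n]
      exact hsel
    rw [greedy_cons_none hfind]
    rw [ih (keySel_none_mono hsel (by omega))]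
    simp

-- a run of a pattern character is translated exactly as pvConsume translates it
theorem run_rules {c : Char} {rules : List (Nat × List Char)}
    (hr : PySem.Dict.get? pvRunRules c = some rules) (rest : List Char)
    (hrest : rest.takeWhile (fun x => x == c) = []) :
    ∀ r f, r ≤ f → greedy (List.replicate r c ++ rest) = pvConsume f rules c r ++ greedy rest := by
  have hitems : (c, rules) ∈ pvRunRules.items := PySem.Dict.mem_items_of_get?_eq_some _ hr
  have hpos : ∀ p ∈ rules, 1 ≤ p.1 := fun p hp => (rules_bounds (c, rules) hitems p hp).1
  have hbnd : ∀ p ∈ rules, 1 ≤ p.1 ∧ p.1 ≤ 6 := rules_bounds (c, rules) hitems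
  intro r
  induction r using Nat.strong_induction_on with
  | _ r IH =>
  intro f hf
  cases r with
  | zero => rw [pvConsume_zero]; simp
  | succ n =>
    cases f with
    | zero => omega
    | succ g =>
      have hkey := rules_keySel (c, rules) hitems (min (n + 1) 6) (min6_mem (by omega))
      rw [← rules_find_min6 hbnd (n + 1)] at hkey
      rw [← keySel_min6] at hkey
      simp only [pvConsume, if_neg (Nat.succ_ne_zero n)]
      cases hfind : rules.find? (fun p => decide (p.1 ≤ n + 1)) with
      | none =>
        rw [hfind] at hkey
        have hsel : keySel c (n + 1) = none := hkey
        rw [run_lit c rest hrest (n + 1) hsel]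
      | some kr =>
        rw [hfind] at hkey
        have hsel : keySel c (n + 1) = some (List.replicate kr.1 c) := hkey
        have hlook : pvLookup (List.replicate kr.1 c) = kr.2 :=
          rules_lookup (c, rules) hitems kr (List.mem_of_find?_eq_some hfind)
        have hk1 : 1 ≤ kr.1 := hpos kr (List.mem_of_find?_eq_some hfind)
        have hkle : kr.1 ≤ n + 1 := by
          have := List.find?_some hfind
          simpa using this
        have hcons : List.replicate (n + 1) c ++ rest = c :: (List.replicate n c ++ rest) := by
          rw [List.replicate_succ, List.cons_append]
        have hfindg : pvKeys.find? (fun k => PySem.Chars.startswith (c :: (List.replicate n c ++ rest)) k) = some (List.replicate kr.1 c) := by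
          rw [find_eq_keySel, takeWhile_repl_append c rest hrest n]
          exact hsel
        rw [hcons, greedy_cons_some hfindg]
        have hdrop : (c :: (List.replicate n c ++ rest)).drop (List.replicate kr.1 c).length =
            List.replicate (n + 1 - kr.1) c ++ rest := by
          rw [← hcons, List.length_replicate]
          rw [List.drop_append_of_le_length (by simp; omega), List.drop_replicate]
        rw [hdrop, hlook]
        rw [IH (n + 1 - kr.1) (by omega) g (by omega)]
        simp

-- the maximal-run split of a nonempty list
theorem takeWhile_eq_replicate (c : Char) (t : List Char) :
    t.takeWhile (fun x => x == c) = List.replicate (t.takeWhile (fun x => x == c)).length c := by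
  apply List.eq_replicate_of_mem
  intro b hb
  have := List.mem_takeWhile_imp hb
  simpa using this

theorem takeWhile_dropWhile_nil (c : Char) (t : List Char) :
    (t.dropWhile (fun x => x == c)).takeWhile (fun x => x == c) = [] := by
  induction t with
  | nil => rfl
  | cons a l ih =>
    rw [List.dropWhile_cons]
    by_cases h : (a == c) = true
    · rw [if_pos h]; exact ih
    · rw [if_neg h, List.takeWhile_cons, if_neg h]

theorem run_split (c : Char) (t : List Char) :
    c :: t = List.replicate ((t.takeWhile (fun x => x == c)).length + 1) c ++
      t.dropWhile (fun x => x == c) := by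
  rw [List.replicate_succ, List.cons_append]
  congr 1
  conv_lhs => rw [← List.takeWhile_append_dropWhile (p := fun x => x == c) (l := t)]
  congr 1
  exact takeWhile_eq_replicate c t

-- part 2: B = greedy on char lists
theorem mainB (s : List Char) : pvRle s = greedy s := by
  induction hs : s.length using Nat.strong_induction_on generalizing s with
  | _ n IH =>
  subst hs
  cases s with
  | nil => rw [pvRle]; rfl
  | cons c t =>
    rw [pvRle]
    have hlen : (t.dropWhile (fun x => x == c)).length < (c :: t).length :=
      Nat.lt_succ_of_le (List.length_dropWhile_le _ t)
    rw [IH _ hlen _ rfl]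
    have hrest : (t.dropWhile (fun x => x == c)).takeWhile (fun x => x == c) = [] :=
      takeWhile_dropWhile_nil c t
    cases hg : PySem.Dict.get? pvRunRules c with
    | none =>
      have hnm : c ∉ pvRunRules.keys := (PySem.Dict.get?_eq_none_iff_not_mem_keys _ _).mp hg
      have hsel : ∀ r, keySel c r = none := by
        intro r
        apply List.find?_eq_none.mpr
        intro k hk
        have hmem := key_heads k hk
        have hne : k.headD 'x' ≠ c := fun heq => hnm (heq ▸ hmem)
        simp only [Bool.not_eq_true, Bool.and_eq_false_iff]
        exact Or.inl (beq_eq_false_iff_ne.mpr hne)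
      conv_rhs => rw [run_split c t]
      rw [run_lit c _ hrest _ (hsel _)]
    | some rules =>
      conv_rhs => rw [run_split c t]
      rw [run_rules hg _ hrest _ _ (le_refl _)]

-- ===== VERDICT (by name: the statement is the Claim_ definition above) =====
theorem ldml_to_posix_format_py_spec : Claim_equal_ldml_to_posix_format_py := by
  intro ldml _
  unfold Spec_ldml_to_posix_format_py ldml_to_posix_format_py ldml_to_posix_format_py_alt
  rw [mainA, mainB]
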